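-- pv_equiv track=rewrite | github.com/cieloblanco/videoSearch | funciones/lambda/indexarJsonVideo.py | etiquetaTiemposValor
-- ===== SOURCE A (Python) =====
-- def etiquetaTiemposValor(etiquetaMinsSegs, instante):
--
--     # etiquetaMinsSegs: {"alpaca":[3,23,45,123], "auto":[5] }
--
--     # etiquetaTiempos: {"alpaca":[3,45], "auto":[5] }
--
--     # etiquetaValor: {"alpaca": 13, "auto": 5 }
--
--     etiquetaTiempos = {}
--     etiquetaValor = {}
--
--     for etiqueta, minSeg in etiquetaMinsSegs.items():
--
--         tiempoValor = []
--         count = 1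
--         tiempo = 0
--
--         for t in range(len(minSeg)):
--             if ( t+1<len(minSeg) and minSeg[t]+instante == minSeg[t+1]):
--                 count+=1
--             else:
--                 tiempoValor.append((minSeg[tiempo], count))
--                 tiempo = t+1
--                 count = 1
--
--         tiempoValor = sorted(tiempoValor, key=lambda x:x[1], reverse=True)
--
--         etiquetaTiempos[etiqueta] = [i[0] for i in tiempoValor]
--         etiquetaValor[etiqueta] = len(minSeg)
--
--     return etiquetaTiempos, etiquetaValor
-- ===== SOURCE B (Python) =====
-- def etiquetaTiemposValor(etiquetaMinsSegs, instante):
--     # Run detection by key normalization: v - i*instante is constant along a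
--     # step-`instante` run, so run starts are the indices where that key changes;
--     # run lengths are differences of consecutive start positions.
--     etiquetaTiempos = {}
--     etiquetaValor = {}
--     for etiqueta, minSeg in etiquetaMinsSegs.items():
--         n = len(minSeg)
--         keys = [v - i * instante for i, v in enumerate(minSeg)]
--         starts = [i for i in range(n) if i == 0 or keys[i - 1] != keys[i]]
--         ends = starts[1:] + [n]
--         pairs = sorted(((minSeg[s], e - s) for s, e in zip(starts, ends)),
--                        key=lambda p: p[1], reverse=True)
--         etiquetaTiempos[etiqueta] = [p[0] for p in pairs]
--         etiquetaValor[etiqueta] = n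
--     return etiquetaTiempos, etiquetaValor
-- ===== Notes on version B (the rewrite author's own statement) =====
-- stated objective: alternative
-- what changed: Run detection by a counter loop with tiempo/count state is replaced by key normalization: v - i*instante is constant along a run, so run-start indices are collected by a comprehension over the normalized keys and run lengths are differences of consecutive start positions obtained by zipping the start list with its shift.
import Mathlib
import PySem

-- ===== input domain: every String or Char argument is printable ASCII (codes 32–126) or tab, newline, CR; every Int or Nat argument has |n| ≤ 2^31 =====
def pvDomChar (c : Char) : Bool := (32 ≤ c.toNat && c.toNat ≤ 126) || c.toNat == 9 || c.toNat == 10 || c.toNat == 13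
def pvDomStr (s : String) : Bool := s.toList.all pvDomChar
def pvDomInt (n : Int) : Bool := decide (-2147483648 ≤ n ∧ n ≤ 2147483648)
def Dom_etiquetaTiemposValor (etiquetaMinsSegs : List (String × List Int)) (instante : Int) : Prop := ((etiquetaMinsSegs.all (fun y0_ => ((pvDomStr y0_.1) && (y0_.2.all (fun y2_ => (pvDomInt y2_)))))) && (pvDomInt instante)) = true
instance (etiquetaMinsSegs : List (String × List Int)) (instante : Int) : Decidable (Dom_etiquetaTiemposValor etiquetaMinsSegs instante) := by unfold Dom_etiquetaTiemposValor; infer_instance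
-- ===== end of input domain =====

-- B replaces A's counter loop by key normalization: run starts are the indices where
-- v - i*instante changes, collected by comprehension; counts are differences of
-- consecutive start positions (zip); alternative algorithm, same cost.


-- ===== PORT A =====
-- inner loop of A: for t in range(len(minSeg)) with state (tiempoValor, tiempo, count)
def pvInnerA (minSeg : List Int) (instante : Int) : List (Int × Int) :=
  ((PySem.List.pyRange 0 (minSeg.length : Int) 1).foldl
    (fun (s : List (Int × Int) × Int × Int) t =>
      if t + 1 < (minSeg.length : Int) ∧
          PySem.List.pyGetD minSeg t 0 + instante = PySem.List.pyGetD minSeg (t + 1) 0 then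
        (s.1, s.2.1, s.2.2 + 1)
      else
        (s.1 ++ [(PySem.List.pyGetD minSeg s.2.1 0, s.2.2)], t + 1, 1))
    ([], 0, 1)).1

def etiquetaTiemposValor (etiquetaMinsSegs : List (String × List Int)) (instante : Int) : (List (String × List Int)) × (List (String × Int)) :=
  let final := etiquetaMinsSegs.foldl
    (fun (acc : PySem.Dict String (List Int) × PySem.Dict String Int) p =>
      let tiempoValor := PySem.List.sorted (pvInnerA p.2 instante) (fun x => x.2) true
      (acc.1.insert p.1 (tiempoValor.map (fun i => i.1)),
       acc.2.insert p.1 (p.2.length : Int)))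
    (PySem.Dict.empty, PySem.Dict.empty)
  (final.1.items, final.2.items)

-- ===== PORT B =====
-- inner computation of B: keys = [v - i*instante], starts by comprehension, counts by zip
def pvPairsB (minSeg : List Int) (instante : Int) : List (Int × Int) :=
  let n : Int := (minSeg.length : Int)
  let keys : List Int := (PySem.List.enumerate minSeg 0).map (fun p => p.2 - p.1 * instante)
  let starts : List Int := (PySem.List.pyRange 0 n 1).filter
      (fun i => i == 0 || !(PySem.List.pyGetD keys (i - 1) 0 == PySem.List.pyGetD keys i 0))
  let ends : List Int := PySem.List.slice starts (some 1) none ++ [n]   -- starts[1:] + [n]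
  (starts.zip ends).map (fun se => (PySem.List.pyGetD minSeg se.1 0, se.2 - se.1))

def etiquetaTiemposValor_alt (etiquetaMinsSegs : List (String × List Int)) (instante : Int) : (List (String × List Int)) × (List (String × Int)) :=
  let final := etiquetaMinsSegs.foldl
    (fun (acc : PySem.Dict String (List Int) × PySem.Dict String Int) p =>
      let pairs := PySem.List.sorted (pvPairsB p.2 instante) (fun r => r.2) true
      (acc.1.insert p.1 (pairs.map (fun r => r.1)),
       acc.2.insert p.1 (p.2.length : Int)))
    (PySem.Dict.empty, PySem.Dict.empty)
  (final.1.items, final.2.items)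

-- ===== PRECONDITION & SPEC =====
def Spec_etiquetaTiemposValor (etiquetaMinsSegs : List (String × List Int)) (instante : Int) (out : (List (String × List Int)) × (List (String × Int))) : Prop := out = etiquetaTiemposValor_alt etiquetaMinsSegs instante
instance (etiquetaMinsSegs : List (String × List Int)) (instante : Int) (out : (List (String × List Int)) × (List (String × Int))) : Decidable (Spec_etiquetaTiemposValor etiquetaMinsSegs instante out) := by unfold Spec_etiquetaTiemposValor; infer_instance

-- ===== CLAIM (what is proved, stated in full; the proofs are below) =====
def Claim_equal_etiquetaTiemposValor : Prop := ∀ (etiquetaMinsSegs : List (String × List Int)) (instante : Int), Dom_etiquetaTiemposValor etiquetaMinsSegs instante → Spec_etiquetaTiemposValor etiquetaMinsSegs instante (etiquetaTiemposValor etiquetaMinsSegs instante)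

-- ===== LEMMAS AND PROOFS =====

-- common run-list normal form: head-merge recursion (proof-side only)
def pvStepB (instante v : Int) (runs : List (Int × Int)) : List (Int × Int) :=
  match runs with
  | (s, c) :: rest => if v + instante = s then (v, c + 1) :: rest else (v, 1) :: (s, c) :: rest
  | [] => [(v, 1)]

def pvRunsB (instante : Int) : List Int → List (Int × Int)
  | [] => []
  | v :: vs => pvStepB instante v (pvRunsB instante vs)

lemma pvRunsB_cons (instante v : Int) (vs : List Int) :
    ∃ c more, pvRunsB instante (v :: vs) = (v, c) :: more := by
  show ∃ c more, pvStepB instante v (pvRunsB instante vs) = (v, c) :: more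
  unfold pvStepB
  rcases pvRunsB instante vs with _ | ⟨⟨s, c⟩, rest⟩
  · exact ⟨1, [], rfl⟩
  · by_cases h : v + instante = s
    · exact ⟨c + 1, rest, by simp [h]⟩
    · exact ⟨1, (s, c) :: rest, by simp [h]⟩

-- ---------- A-side: A's indexed loop produces pvRunsB ----------

-- A's inner loop, list-consuming form: current run started at value st with count elements so far
def pvLoopL (instante : Int) (tv : List (Int × Int)) (st count : Int) : List Int → List (Int × Int)
  | [] => tv
  | [_] => tv ++ [(st, count)]
  | cur :: next :: rest =>
      if cur + instante = next then pvLoopL instante tv st (count + 1) (next :: rest)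
      else pvLoopL instante (tv ++ [(st, count)]) next 1 (next :: rest)

lemma pvLoopL_spec (instante : Int) : ∀ (ys : List Int) (_ : ys ≠ []) (tv : List (Int × Int)) (st count : Int),
    pvLoopL instante tv st count ys =
      tv ++ (match pvRunsB instante ys with
             | (_, c0) :: more => (st, count - 1 + c0) :: more
             | [] => []) := by
  intro ys
  induction ys with
  | nil => intro h; exact absurd rfl h
  | cons cur rest ih =>
    intro _ tv st count
    cases rest with
    | nil => simp [pvLoopL, pvRunsB, pvStepB]
    | cons next rs =>
      obtain ⟨c1, more1, h1⟩ := pvRunsB_cons instante next rs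
      have hrw : pvRunsB instante (cur :: next :: rs) = pvStepB instante cur ((next, c1) :: more1) := by
        rw [← h1]; rfl
      rw [hrw]
      by_cases h : cur + instante = next
      · rw [show pvLoopL instante tv st count (cur :: next :: rs)
              = pvLoopL instante tv st (count + 1) (next :: rs) from by simp [pvLoopL, h]]
        rw [ih (by simp) tv st (count + 1), h1]
        simp only [pvStepB, if_pos h]
        have : count + 1 - 1 + c1 = count - 1 + (c1 + 1) := by omega
        rw [this]
      · rw [show pvLoopL instante tv st count (cur :: next :: rs)
              = pvLoopL instante (tv ++ [(st, count)]) next 1 (next :: rs) from by simp [pvLoopL, h]]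
        rw [ih (by simp) (tv ++ [(st, count)]) next 1, h1]
        simp only [pvStepB, if_neg h]
        have h3 : count - 1 + 1 = count := by omega
        simp [h3]

-- bridge: A's fold over range(i, len) equals pvLoopL on the dropped suffix
lemma pvInnerA_bridge (minSeg : List Int) (instante : Int) :
    ∀ (k i : Nat), minSeg.length = i + k → i < minSeg.length →
    ∀ (tv : List (Int × Int)) (tiempo count : Int),
    ((PySem.List.pyRange (i : Int) (minSeg.length : Int) 1).foldl
      (fun (s : List (Int × Int) × Int × Int) t =>
        if t + 1 < (minSeg.length : Int) ∧
            PySem.List.pyGetD minSeg t 0 + instante = PySem.List.pyGetD minSeg (t + 1) 0 then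
          (s.1, s.2.1, s.2.2 + 1)
        else
          (s.1 ++ [(PySem.List.pyGetD minSeg s.2.1 0, s.2.2)], t + 1, 1))
      (tv, tiempo, count)).1
    = pvLoopL instante tv (PySem.List.pyGetD minSeg tiempo 0) count (minSeg.drop i) := by
  intro k
  induction k with
  | zero => intro i hlen hlt; omega
  | succ k ih =>
    intro i hlen hlt tv tiempo count
    have hi : (i : Int) < (minSeg.length : Int) := by exact_mod_cast hlt
    have hcast : ((i : Int) + 1) = ((i + 1 : Nat) : Int) := by push_cast; ring
    have hgi : PySem.List.pyGetD minSeg (i : Int) 0 = minSeg[i] := by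
      rw [PySem.List.pyGetD_natCast, List.getD_eq_getElem _ _ hlt]
    have hdrop : minSeg.drop i = minSeg[i] :: minSeg.drop (i + 1) :=
      List.drop_eq_getElem_cons hlt
    rw [PySem.List.pyRange_one_cons hi, List.foldl_cons]
    by_cases hk : i + 1 < minSeg.length
    · have hgi1 : PySem.List.pyGetD minSeg ((i : Int) + 1) 0 = minSeg[i + 1] := by
        rw [hcast, PySem.List.pyGetD_natCast, List.getD_eq_getElem _ _ hk]
      have hdrop1 : minSeg.drop (i + 1) = minSeg[i + 1] :: minSeg.drop (i + 2) :=
        List.drop_eq_getElem_cons hk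
      by_cases heq : minSeg[i] + instante = minSeg[i + 1]
      · rw [if_pos ⟨by exact_mod_cast hk, by rw [hgi, hgi1]; exact heq⟩]
        rw [hcast, ih (i + 1) (by omega) hk tv tiempo (count + 1)]
        rw [hdrop, hdrop1, pvLoopL, if_pos heq, ← hdrop1]
      · rw [if_neg (fun hc => heq (by rw [hgi, hgi1] at hc; exact hc.2))]
        rw [hcast, ih (i + 1) (by omega) hk (tv ++ [(PySem.List.pyGetD minSeg tiempo 0, count)]) ((i + 1 : Nat) : Int) 1]
        rw [PySem.List.pyGetD_natCast, List.getD_eq_getElem _ _ hk]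
        rw [hdrop, hdrop1, pvLoopL, if_neg heq, ← hdrop1]
    · have hend : minSeg.length = i + 1 := by omega
      rw [if_neg (fun hc => hk (by exact_mod_cast hc.1))]
      have hnil : PySem.List.pyRange ((i : Int) + 1) (minSeg.length : Int) 1 = [] :=
        PySem.List.pyRange_one_eq_nil (by exact_mod_cast Nat.le_of_eq hend)
      rw [hnil, List.foldl_nil]
      have hdnil : minSeg.drop (i + 1) = [] := List.drop_eq_nil_of_le (by omega)
      rw [hdrop, hdnil, pvLoopL]

lemma pvInnerA_eq_runsB (minSeg : List Int) (instante : Int) :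
    pvInnerA minSeg instante = pvRunsB instante minSeg := by
  cases minSeg with
  | nil =>
    simp [pvInnerA, pvRunsB, PySem.List.pyRange_one_eq_nil]
  | cons x xs =>
    unfold pvInnerA
    have h0 : ((0 : Nat) : Int) = (0 : Int) := by norm_num
    have := pvInnerA_bridge (x :: xs) instante (x :: xs).length 0 (by omega) (by simp) [] 0 1
    rw [h0, List.drop_zero] at this
    rw [this]
    rw [pvLoopL_spec instante (x :: xs) (by simp) [] _ 1]
    obtain ⟨c0, more, hr⟩ := pvRunsB_cons instante x xs
    rw [hr]
    have hg : PySem.List.pyGetD (x :: xs) (0 : Int) 0 = x := by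
      rw [show ((0 : Int)) = ((0 : Nat) : Int) from by norm_num, PySem.List.pyGetD_natCast]
      rfl
    simp [hg]

-- ---------- B-side: Nat-index normal form ----------

-- B's boundary predicate over Nat indices, phrased on the values directly
def pvP (instante : Int) (L : List Int) (i : Nat) : Bool :=
  i == 0 || !(L.getD (i - 1) 0 + instante == L.getD i 0)

def pvStartsN (instante : Int) (L : List Int) : List Nat :=
  (List.range L.length).filter (pvP instante L)

def pvPairsN (instante : Int) (L : List Int) : List (Int × Int) :=
  ((pvStartsN instante L).zip ((pvStartsN instante L).tail ++ [L.length])).map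
    (fun se => (L.getD se.1 0, (se.2 : Int) - (se.1 : Int)))

lemma pvStartsN_nil (instante : Int) : pvStartsN instante [] = [] := by
  simp [pvStartsN]

lemma pvStartsN_cons (instante v : Int) (vs : List Int) :
    pvStartsN instante (v :: vs) =
      0 :: List.map (· + 1) ((List.range vs.length).filter (fun i => pvP instante (v :: vs) (i + 1))) := by
  unfold pvStartsN
  rw [show (v :: vs).length = vs.length + 1 from rfl, List.range_succ_eq_map]
  rw [List.filter_cons_of_pos (by simp [pvP])]
  rw [List.filter_map]
  simp [Function.comp_def, Nat.succ_eq_add_one]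

lemma pvP_succ_succ (instante v : Int) (vs : List Int) (j : Nat) :
    pvP instante (v :: vs) (j + 1 + 1) = pvP instante vs (j + 1) := by
  simp [pvP]

lemma pvStartsN_cons_ne (instante v w : Int) (t : List Int) (hne : ¬ v + instante = w) :
    pvStartsN instante (v :: w :: t) = 0 :: List.map (· + 1) (pvStartsN instante (w :: t)) := by
  rw [pvStartsN_cons]
  unfold pvStartsN
  congr 1
  congr 1
  apply List.filter_congr
  intro i _
  cases i with
  | zero => simp [pvP, hne]
  | succ j => exact pvP_succ_succ instante v (w :: t) j

lemma pvStartsN_cons_eq (instante v w : Int) (t : List Int) (heq : v + instante = w) :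
    pvStartsN instante (v :: w :: t) = 0 :: List.map (· + 1) ((pvStartsN instante (w :: t)).tail) := by
  rw [pvStartsN_cons]
  congr 1
  rw [pvStartsN_cons]
  simp only [List.tail_cons]
  rw [show (w :: t).length = t.length + 1 from rfl, List.range_succ_eq_map]
  rw [List.filter_cons_of_neg (by simp [pvP, heq])]
  rw [List.filter_map]
  have hf : List.filter ((fun i => pvP instante (v :: w :: t) (i + 1)) ∘ Nat.succ) (List.range t.length)
      = List.filter (fun i => pvP instante (w :: t) (i + 1)) (List.range t.length) := by
    apply List.filter_congr
    intro i _
    exact pvP_succ_succ instante v (w :: t) i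
  rw [hf]

-- index shift: zipped (+1)-shifted start/end pairs over v :: vs are the unshifted pairs over vs
lemma pvShiftMap (instante v : Int) (vs : List Int) (X Y : List Nat) :
    ((X.map (· + 1)).zip (Y.map (· + 1))).map
        (fun (se : Nat × Nat) => ((v :: vs).getD se.1 0, (se.2 : Int) - (se.1 : Int)))
      = (X.zip Y).map (fun (se : Nat × Nat) => (vs.getD se.1 0, (se.2 : Int) - (se.1 : Int))) := by
  rw [List.zip_map, List.map_map]
  apply List.map_congr_left
  intro se _
  cases se with
  | mk s e =>
    simp only [Function.comp_def, Prod.map, List.getD_cons_succ, Prod.mk.injEq]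
    exact ⟨by trivial, by omega⟩

lemma pvPairsN_eq_runsB (instante : Int) : ∀ (L : List Int),
    pvPairsN instante L = pvRunsB instante L := by
  intro L
  induction L with
  | nil => simp [pvPairsN, pvStartsN_nil, pvRunsB]
  | cons v vs ih =>
    cases vs with
    | nil =>
      simp [pvPairsN, pvStartsN, pvP, pvRunsB, pvStepB, List.range_succ]
    | cons w t =>
      rw [show pvRunsB instante (v :: w :: t) = pvStepB instante v (pvRunsB instante (w :: t)) from rfl, ← ih]
      obtain ⟨T, hT⟩ : ∃ T, pvStartsN instante (w :: t) = 0 :: T := ⟨_, pvStartsN_cons instante w t⟩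
      have hTt : (pvStartsN instante (w :: t)).tail = T := by rw [hT]; rfl
      by_cases heq : v + instante = w
      · -- run extends: starts of v::w::t are 0 :: (T+1)
        have hS : pvStartsN instante (v :: w :: t) = 0 :: T.map (· + 1) := by
          rw [pvStartsN_cons_eq instante v w t heq, hTt]
        unfold pvPairsN
        rw [hS, hT]
        cases T with
        | nil =>
          simp only [List.map_nil, List.tail_cons, List.nil_append, List.zip_cons_cons,
            List.zip_nil_left, List.map_cons, List.map_nil, List.getD_cons_zero, pvStepB]
          rw [if_pos heq]
          simp only [List.cons.injEq, Prod.mk.injEq, List.length_cons, eq_self_iff_true,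
            true_and, and_true]
          all_goals omega
        | cons a T' =>
          have hsplit : (a :: T').map (· + 1) ++ [(v :: w :: t).length]
              = ((a :: T') ++ [(w :: t).length]).map (· + 1) := by
            simp [List.length_cons]
          simp only [List.tail_cons]
          rw [hsplit]
          rw [show ((a :: T') ++ [(w :: t).length]).map (· + 1)
                = (a + 1) :: ((T' ++ [(w :: t).length]).map (· + 1)) from by simp]
          rw [show (a :: T').map (· + 1) = (a + 1) :: T'.map (· + 1) from by simp]
          rw [List.zip_cons_cons, List.map_cons]
          rw [show (a + 1) :: T'.map (· + 1) = (a :: T').map (· + 1) from by simp]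
          rw [pvShiftMap instante v (w :: t) (a :: T') (T' ++ [(w :: t).length])]
          rw [List.cons_append, List.zip_cons_cons, List.map_cons]
          simp only [pvStepB, List.getD_cons_zero]
          rw [if_pos heq]
          simp only [List.cons.injEq, Prod.mk.injEq, eq_self_iff_true, true_and, and_true]
          all_goals omega
      · -- new run: starts of v::w::t are 0 :: ((0::T)+1)
        have hS : pvStartsN instante (v :: w :: t) = 0 :: (0 :: T).map (· + 1) := by
          rw [pvStartsN_cons_ne instante v w t heq, hT]
        unfold pvPairsN
        rw [hS, hT]
        have hsplit : (0 :: T).map (· + 1) ++ [(v :: w :: t).length]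
            = ((0 :: T) ++ [(w :: t).length]).map (· + 1) := by
          simp [List.length_cons]
        simp only [List.tail_cons]
        rw [hsplit]
        rw [show ((0 :: T) ++ [(w :: t).length]).map (· + 1)
              = (0 + 1) :: ((T ++ [(w :: t).length]).map (· + 1)) from by simp]
        rw [show (0 :: T).map (· + 1) = (0 + 1) :: T.map (· + 1) from by simp]
        rw [List.zip_cons_cons, List.map_cons]
        rw [show (0 + 1) :: T.map (· + 1) = (0 :: T).map (· + 1) from by simp]
        rw [pvShiftMap instante v (w :: t) (0 :: T) (T ++ [(w :: t).length])]
        obtain ⟨c, more, hruns⟩ := pvRunsB_cons instante w t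
        rw [← ih] at hruns
        unfold pvPairsN at hruns
        rw [hT] at hruns
        simp only [List.tail_cons] at hruns
        rw [hruns]
        simp only [pvStepB]
        rw [if_neg heq]
        simp only [List.getD_cons_zero, List.cons.injEq, Prod.mk.injEq, eq_self_iff_true,
          true_and, and_true]
        all_goals omega

-- bridge: the port's Int-index computation equals the Nat-index normal form
lemma pvKeysGetD (L : List Int) (inst : Int) (j : Nat) (hj : j < L.length) :
    ((PySem.List.enumerate L 0).map (fun p => p.2 - p.1 * inst)).getD j 0
      = L.getD j 0 - (j : Int) * inst := by
  have hlen : ((PySem.List.enumerate L 0).map (fun p => p.2 - p.1 * inst)).length = L.length := by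
    simp [PySem.List.length_enumerate]
  rw [List.getD_eq_getElem _ _ (by rw [hlen]; exact hj), List.getD_eq_getElem _ _ hj]
  simp [PySem.List.getElem_enumerate]

lemma pvStartsBridge (L : List Int) (inst : Int) :
    (PySem.List.pyRange 0 (L.length : Int) 1).filter
      (fun i => i == 0 ||
        !(PySem.List.pyGetD ((PySem.List.enumerate L 0).map (fun p => p.2 - p.1 * inst)) (i - 1) 0 ==
          PySem.List.pyGetD ((PySem.List.enumerate L 0).map (fun p => p.2 - p.1 * inst)) i 0))
    = (pvStartsN inst L).map (fun k : Nat => (k : Int)) := by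
  rw [PySem.List.pyRange_one]
  simp only [sub_zero, Int.toNat_natCast, zero_add]
  rw [List.filter_map]
  unfold pvStartsN
  congr 1
  apply List.filter_congr
  intro i hi
  have hilen : i < L.length := List.mem_range.mp hi
  cases i with
  | zero => simp [pvP]
  | succ j =>
    have h0 : (((j + 1 : Nat) : Int) == 0) = false := beq_eq_false_iff_ne.mpr (by omega)
    have h0' : (((j + 1 : Nat)) == (0 : Nat)) = false := beq_eq_false_iff_ne.mpr (by omega)
    have hcast : ((j + 1 : Nat) : Int) - 1 = (j : Nat) := by push_cast; ring
    simp only [Function.comp_def, h0, hcast, PySem.List.pyGetD_natCast, Bool.false_or, pvP, h0']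
    rw [pvKeysGetD L inst j (by omega), pvKeysGetD L inst (j + 1) hilen]
    have hiff : (L.getD j 0 - (j : Int) * inst = L.getD (j + 1) 0 - ((j + 1 : Nat) : Int) * inst)
        ↔ (L.getD j 0 + inst = L.getD (j + 1) 0) := by
      push_cast
      constructor <;> intro h <;> linear_combination h
    rw [Bool.eq_iff_iff]
    simp only [Bool.not_eq_true', beq_eq_false_iff_ne]
    exact not_congr hiff

lemma pvPairsB_eq_pairsN (minSeg : List Int) (instante : Int) :
    pvPairsB minSeg instante = pvPairsN instante minSeg := by
  show List.map (fun se => (PySem.List.pyGetD minSeg se.1 0, se.2 - se.1))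
      (((PySem.List.pyRange 0 (minSeg.length : Int) 1).filter
        (fun i => i == 0 ||
          !(PySem.List.pyGetD ((PySem.List.enumerate minSeg 0).map (fun p => p.2 - p.1 * instante)) (i - 1) 0 ==
            PySem.List.pyGetD ((PySem.List.enumerate minSeg 0).map (fun p => p.2 - p.1 * instante)) i 0))).zip
       (PySem.List.slice ((PySem.List.pyRange 0 (minSeg.length : Int) 1).filter
          (fun i => i == 0 ||
            !(PySem.List.pyGetD ((PySem.List.enumerate minSeg 0).map (fun p => p.2 - p.1 * instante)) (i - 1) 0 ==
              PySem.List.pyGetD ((PySem.List.enumerate minSeg 0).map (fun p => p.2 - p.1 * instante)) i 0)))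
          (some 1) none ++ [(minSeg.length : Int)]))
    = pvPairsN instante minSeg
  rw [pvStartsBridge]
  rw [PySem.List.slice_from_one]
  rw [← List.map_tail]
  rw [show [(minSeg.length : Int)] = ([minSeg.length].map (fun k : Nat => (k : Int))) from rfl]
  rw [← List.map_append]
  rw [List.zip_map, List.map_map]
  unfold pvPairsN
  apply List.map_congr_left
  intro se _
  cases se with
  | mk s e =>
    simp only [Function.comp_def, Prod.map, PySem.List.pyGetD_natCast]

lemma pvInner_eq (minSeg : List Int) (instante : Int) :
    pvInnerA minSeg instante = pvPairsB minSeg instante := by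
  rw [pvInnerA_eq_runsB, pvPairsB_eq_pairsN, pvPairsN_eq_runsB]

-- ===== VERDICT (by name: the statement is the Claim_ definition above) =====
theorem etiquetaTiemposValor_spec : Claim_equal_etiquetaTiemposValor := by
  intro ems inst _
  unfold Spec_etiquetaTiemposValor etiquetaTiemposValor etiquetaTiemposValor_alt
  have : ∀ (acc : PySem.Dict String (List Int) × PySem.Dict String Int) (p : String × List Int),
      (fun (acc : PySem.Dict String (List Int) × PySem.Dict String Int) p =>
        let tiempoValor := PySem.List.sorted (pvInnerA p.2 inst) (fun x : Int × Int => x.2) true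
        (acc.1.insert p.1 (tiempoValor.map (fun i => i.1)),
         acc.2.insert p.1 (p.2.length : Int))) acc p
      = (fun (acc : PySem.Dict String (List Int) × PySem.Dict String Int) p =>
        let pairs := PySem.List.sorted (pvPairsB p.2 inst) (fun r : Int × Int => r.2) true
        (acc.1.insert p.1 (pairs.map (fun r => r.1)),
         acc.2.insert p.1 (p.2.length : Int))) acc p := by
    intro acc p
    simp only [pvInner_eq]
  rw [funext fun acc => funext fun p => this acc p]
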